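-- pv_equiv track=rewrite | github.com/filip-jezek/CellML2Modelica | fun_lib.py | fillEquationString
-- ===== SOURCE A (Python) =====
-- def fillEquationString(txt):
--     # find position for the "equation" label
--     bgs = txt.split('\n')
--     bgs.reverse()
--     equations = False
--     newComp = False
--     text = ""
--
--     for l in bgs:
--         if 'enddef;' in l:
--             newComp = True
--             equations = False
--         if '=' in l:         equations = True
--         if newComp and equations and 'var' in l:
--             l = l + '\n\tequation\n'
--             newComp = False
--         text = l + '\n' + text
--     return text
-- ===== SOURCE B (Python) =====
-- def fillEquationString(txt):
--     # forward block-at-a-time pass: for each block ending at an 'enddef;' line,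
--     # insert the label after the last 'var' line at or before the block's last '=' line
--     pieces = []
--     block = []
--     for line in txt.split('\n'):
--         block.append(line)
--         if 'enddef;' in line:
--             pieces.extend(_render_block(block))
--             block = []
--     pieces.extend(l + '\n' for l in block)
--     return ''.join(pieces)
--
-- def _render_block(block):
--     tmp = block[:]
--     while tmp and '=' not in tmp[-1]:
--         tmp.pop()
--     cand = None
--     for j, l in enumerate(tmp):
--         if 'var' in l:
--             cand = j
--     return [l + '\n' + ('\tequation\n\n' if j == cand else '')
--             for j, l in enumerate(block)]
-- ===== Notes on version B (the rewrite author's own statement) =====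
-- stated objective: alternative
-- what changed: Replaces the reverse single pass with two running boolean flags by a forward block-at-a-time decomposition: lines are grouped into blocks ending at each block-terminator line, and every block is rendered independently by locating its last equals line and the last variable line at or before it, appending the equation label to that line.
import Mathlib
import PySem

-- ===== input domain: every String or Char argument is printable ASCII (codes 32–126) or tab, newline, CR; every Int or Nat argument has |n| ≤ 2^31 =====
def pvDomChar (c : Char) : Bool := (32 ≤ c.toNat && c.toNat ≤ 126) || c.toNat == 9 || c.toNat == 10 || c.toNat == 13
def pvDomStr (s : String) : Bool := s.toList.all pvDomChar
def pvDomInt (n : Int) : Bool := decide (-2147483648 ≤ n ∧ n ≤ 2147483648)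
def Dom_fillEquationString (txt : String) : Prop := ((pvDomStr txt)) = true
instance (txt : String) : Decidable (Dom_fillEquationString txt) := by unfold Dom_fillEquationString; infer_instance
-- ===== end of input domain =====

-- B replaces A's reverse scan with two boolean flags by a forward block-at-a-time
-- decomposition (same O(n) cost, a different algorithm); return values proved equal.

-- ===== PORT A =====
-- loop body of A's 'for l in bgs' (bgs is the reversed line list); state = (equations, newComp, text)
def fillAStep (st : Bool × Bool × String) (l : String) : Bool × Bool × String :=
  let newComp := if PySem.Str.isIn "enddef;" l then true else st.2.1
  let equations := if PySem.Str.isIn "enddef;" l then false else st.1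
  let equations := if PySem.Str.isIn "=" l then true else equations
  if newComp && (equations && PySem.Str.isIn "var" l) then
    (equations, false, (l ++ "\n\tequation\n") ++ ("\n" ++ st.2.2))
  else
    (equations, newComp, l ++ ("\n" ++ st.2.2))

def fillEquationString (txt : String) : String :=
  -- txt.split('\n'): the separator is non-empty, so split? is always `some` (exact)
  (((PySem.Str.split? txt "\n").getD []).reverse.foldl fillAStep (false, false, "")).2.2

-- ===== PORT B =====
-- "while tmp and '=' not in tmp[-1]: tmp.pop()" — each iteration drops the last element
def rbTrim (bs : List String) : List String :=
  if h : bs = [] then bs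
  else if !(PySem.Str.isIn "=" (bs.getLast h)) then rbTrim bs.dropLast else bs
termination_by bs.length
decreasing_by
  have : 0 < bs.length := List.length_pos_of_ne_nil h
  simp [List.length_dropLast]; omega

-- "for j, l in enumerate(tmp): if 'var' in l: cand = j"
def rbCand (block : List String) : Option Int :=
  (PySem.List.enumerate (rbTrim block)).foldl
    (fun cand q => if PySem.Str.isIn "var" q.2 then some q.1 else cand) none

-- the final list comprehension over enumerate(block)
def renderBlock (block : List String) : List String :=
  (PySem.List.enumerate block).map (fun q =>
    q.2 ++ "\n" ++ (if some q.1 = rbCand block then "\tequation\n\n" else ""))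

-- loop body of B's 'for line in txt.split('\n')'; state = (pieces, block)
def fillBStep (st : List String × List String) (line : String) : List String × List String :=
  let block := st.2 ++ [line]
  if PySem.Str.isIn "enddef;" line then (st.1 ++ renderBlock block, [])
  else (st.1, block)

def fillEquationString_alt (txt : String) : String :=
  -- txt.split('\n'): the separator is non-empty, so split? is always `some` (exact)
  let st := ((PySem.Str.split? txt "\n").getD []).foldl fillBStep ([], [])
  PySem.Str.join "" (st.1 ++ st.2.map (fun l => l ++ "\n"))

-- ===== PRECONDITION & SPEC =====
def Spec_fillEquationString (txt : String) (out : String) : Prop := out = fillEquationString_alt txt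
instance (txt : String) (out : String) : Decidable (Spec_fillEquationString txt out) := by unfold Spec_fillEquationString; infer_instance

-- ===== CLAIM (what is proved, stated in full; the proofs are below) =====
def Claim_equal_fillEquationString : Prop := ∀ (txt : String), Dom_fillEquationString txt → Spec_fillEquationString txt (fillEquationString txt)

-- ===== LEMMAS AND PROOFS =====

-- abbreviations used only by the proofs
def hE (l : String) : Bool := PySem.Str.isIn "enddef;" l
def hQ (l : String) : Bool := PySem.Str.isIn "=" l
def hV (l : String) : Bool := PySem.Str.isIn "var" l

def goA (ls : List String) (st : Bool × Bool × String) : Bool × Bool × String := ls.foldl fillAStep st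
def goB (ls : List String) (st : List String × List String) : List String × List String := ls.foldl fillBStep st
def catN (ls : List String) : String := ls.foldr (· ++ ·) ""

-- index of the line B's renderBlock decorates, as a Nat option (proof-side mirror of rbCand)
def lastV : List String → Option Nat
  | [] => none
  | p :: t => match lastV t with
    | some c => some (c + 1)
    | none => if hV p then some 0 else none

def candN (block : List String) : Option Nat := lastV (rbTrim block)

theorem catN_nil : catN [] = "" := rfl

theorem catN_cons (x : String) (ls : List String) : catN (x :: ls) = x ++ catN ls := rfl

theorem catN_append (a b : List String) : catN (a ++ b) = catN a ++ catN b := by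
  induction a with
  | nil => simp [catN]
  | cons x a ih => simp only [List.cons_append, catN_cons, ih, String.append_assoc]

theorem lit_shift (t : String) :
    "\n\tequation\n" ++ ("\n" ++ t) = "\n" ++ ("\tequation\n\n" ++ t) := by
  have h : ("\n\tequation\n" : String) ++ "\n" = "\n" ++ "\tequation\n\n" := rfl
  rw [← String.append_assoc, ← String.append_assoc, h]

theorem flatten_intersperse (xss : List (List Char)) :
    (List.intersperse ([] : List Char) xss).flatten = xss.flatten := by
  induction xss with
  | nil => rfl
  | cons x xss ih =>
    cases xss with
    | nil => rfl
    | cons y t => simp [List.intersperse] at ih ⊢; simpa using ih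

theorem join_eq_catN (ls : List String) : PySem.Str.join "" ls = catN ls := by
  induction ls with
  | nil => rfl
  | cons p ps ih =>
    rw [catN_cons, ← ih]
    simp [PySem.Str.join, PySem.Chars.join, List.intercalate, flatten_intersperse,
      String.ofList_append, String.ofList_toList]

-- ---- rbTrim structure ----

theorem rbTrim_nil : rbTrim [] = [] := by rw [rbTrim]; simp

theorem rbTrim_concat (t : List String) (x : String) :
    rbTrim (t ++ [x]) = if hQ x then t ++ [x] else rbTrim t := by
  rw [rbTrim.eq_def]
  have hne : t ++ [x] ≠ [] := by simp
  rw [dif_neg hne]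
  simp only [List.getLast_concat, List.dropLast_concat]
  cases hq : PySem.Str.isIn "=" x
  · have hqC : PySem.Chars.isIn ['='] x.toList = false := by simpa using hq
    simp only [hQ]
    simp [hq, hqC]
  · have hqC : PySem.Chars.isIn ['='] x.toList = true := by simpa using hq
    simp only [hQ]
    simp [hq, hqC]

theorem rbTrim_cons (p : String) (bs : List String) :
    rbTrim (p :: bs) = if rbTrim bs = [] then (if hQ p then [p] else []) else p :: rbTrim bs := by
  induction bs using List.reverseRecOn with
  | nil =>
    have h := rbTrim_concat [] p
    simp only [List.nil_append] at h
    simp [h, rbTrim_nil]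
  | append_singleton t x iht =>
    rw [show p :: (t ++ [x]) = (p :: t) ++ [x] from by simp, rbTrim_concat, rbTrim_concat]
    by_cases hq : hQ x
    · simp [hq]
    · simp [hq, iht]

theorem rbTrim_eq_nil_iff (bs : List String) : rbTrim bs = [] ↔ bs.any hQ = false := by
  induction bs using List.reverseRecOn with
  | nil => simp [rbTrim_nil]
  | append_singleton t x iht =>
    rw [rbTrim_concat]
    by_cases hq : hQ x
    · simp [hq]
    · simp [hq, iht]

theorem candN_cons (p : String) (bs : List String) :
    candN (p :: bs) = (match candN bs with
      | some c => some (c + 1)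
      | none => if (p :: bs).any hQ && hV p then some 0 else none) := by
  unfold candN
  rw [rbTrim_cons]
  by_cases h : rbTrim bs = []
  · have hbs : bs.any hQ = false := (rbTrim_eq_nil_iff bs).mp h
    rw [if_pos h, h]
    cases hq : hQ p
    · simp [hq, lastV, hbs]
    · cases hv : hV p <;> simp [hq, hv, lastV, hbs]
  · have hbs : bs.any hQ = true := by
      cases h' : bs.any hQ
      · exact absurd ((rbTrim_eq_nil_iff bs).mpr h') h
      · rfl
    rw [if_neg h]
    cases hc : lastV (rbTrim bs) with
    | some c => simp [lastV, hc]
    | none =>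
      cases hv : hV p <;> simp [lastV, hc, hbs, hv]

-- ---- the candidate loop over enumerate ----

theorem enumFold_lastV (ls : List String) : ∀ (s : Int) (c : Option Int),
    (PySem.List.enumerate ls s).foldl
        (fun cand q => if PySem.Str.isIn "var" q.2 then some q.1 else cand) c
      = (match lastV ls with | some k => some (s + k) | none => c) := by
  induction ls with
  | nil => intro s c; simp [lastV]
  | cons p t ih =>
    intro s c
    rw [PySem.List.enumerate_cons]
    simp only [List.foldl_cons]
    rw [ih]
    cases hl : lastV t with
    | some k =>
      simp only [lastV, hl]
      congr 1
      push_cast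
      ring
    | none =>
      cases hv : PySem.Str.isIn "var" p
      · have hvC : PySem.Chars.isIn ['v','a','r'] p.toList = false := by simpa using hv
        simp only [lastV, hl, hV]
        simp [hv, hvC]
      · have hvC : PySem.Chars.isIn ['v','a','r'] p.toList = true := by simpa using hv
        simp only [lastV, hl, hV]
        simp [hv, hvC]

theorem rbCand_eq (block : List String) :
    rbCand block = (candN block).map (fun k => (k : Int)) := by
  unfold rbCand candN
  rw [enumFold_lastV]
  cases lastV (rbTrim block) <;> simp

theorem enumerate_shift (ls : List String) : ∀ (s : Int),
    PySem.List.enumerate ls (s + 1) = (PySem.List.enumerate ls s).map (fun q => (q.1 + 1, q.2)) := by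
  induction ls with
  | nil => intro s; simp
  | cons p t ih =>
    intro s
    rw [PySem.List.enumerate_cons, PySem.List.enumerate_cons]
    simp [ih (s + 1)]

theorem renderBlock_nil : renderBlock [] = [] := by simp [renderBlock]

theorem renderBlock_cons_catN (p : String) (bs : List String) :
    catN (renderBlock (p :: bs)) =
      (p ++ "\n" ++ (if candN (p :: bs) = some 0 then "\tequation\n\n" else "")) ++
        catN (renderBlock bs) := by
  simp only [renderBlock, rbCand_eq, PySem.List.enumerate_cons, List.map_cons, catN_cons]
  congr 1
  · congr 1
    refine if_congr ?_ rfl rfl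
    cases hc : candN (p :: bs) with
    | none => simp
    | some k => simp <;> omega
  · rw [enumerate_shift bs 0, List.map_map]
    refine congrArg catN (List.map_congr_left ?_)
    intro q hq
    obtain ⟨k, hk, hqe⟩ := (PySem.List.mem_enumerate_iff bs 0 q).mp hq
    have hge : (0 : Int) ≤ q.1 := by rw [hqe]; positivity
    dsimp only [Function.comp_apply]
    congr 1
    refine if_congr ?_ rfl rfl
    cases hc : candN bs with
    | some c =>
      have hpb : candN (p :: bs) = some (c + 1) := by rw [candN_cons, hc]
      rw [hpb]
      simp <;> omega
    | none =>
      have hpb : candN (p :: bs) = (if (p :: bs).any hQ && hV p then some 0 else none) := by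
        rw [candN_cons, hc]
      rw [hpb]
      by_cases hcc : ((p :: bs).any hQ && hV p) = true
      · rw [if_pos hcc]
        simp <;> omega
      · rw [if_neg hcc]
        simp

-- ---- A-side loop structure ----

theorem goA_no_end (ls : List String) : (∀ l ∈ ls, hE l = false) → ∀ (e : Bool) (t : String),
    (goA ls.reverse (e, false, t)).2.1 = false ∧
      (goA ls.reverse (e, false, t)).2.2 = catN (ls.map (· ++ "\n")) ++ t := by
  induction ls with
  | nil => intro _ e t; exact ⟨rfl, by simp [goA, catN]⟩
  | cons p ls ih =>
    intro h e t
    have hp : PySem.Str.isIn "enddef;" p = false := by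
      have := h p (List.mem_cons_self ..); simpa [hE] using this
    have hls : ∀ l ∈ ls, hE l = false := fun l hl => h l (List.mem_cons_of_mem _ hl)
    simp only [List.reverse_cons]
    have hfold : goA (ls.reverse ++ [p]) (e, false, t)
        = fillAStep (goA ls.reverse (e, false, t)) p := by
      simp [goA, List.foldl_append]
    rw [hfold]
    rcases hst : goA ls.reverse (e, false, t) with ⟨E, N, T⟩
    obtain ⟨hN, hT⟩ := ih hls e t
    rw [hst] at hN hT
    simp only at hN hT
    subst hN
    simp only [fillAStep, hp, if_false, Bool.false_and, List.map_cons, catN_cons]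
    refine ⟨rfl, ?_⟩
    rw [hT]
    simp [String.append_assoc]

theorem goA_block (pre : List String) (eline : String) :
    (∀ l ∈ pre, hE l = false) → hE eline = true → ∀ (e n : Bool) (t : String),
    goA (eline :: pre.reverse) (e, n, t) =
      ((pre ++ [eline]).any hQ, (candN (pre ++ [eline])).isNone,
        catN (renderBlock (pre ++ [eline])) ++ t) := by
  induction pre with
  | nil =>
    intro _ hel e n t
    have helC : PySem.Chars.isIn ['e','n','d','d','e','f',';'] eline.toList = true := by
      simpa using (hel : PySem.Str.isIn "enddef;" eline = true)
    have hcand : candN [eline] = if hQ eline && hV eline then some 0 else none := by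
      unfold candN
      rw [rbTrim_cons, if_pos rbTrim_nil]
      cases hq : hQ eline
      · simp [hq, lastV]
      · cases hv : hV eline <;> simp [hq, hv, lastV]
    have hrender : catN (renderBlock [eline]) =
        (eline ++ "\n" ++ (if candN [eline] = some 0 then "\tequation\n\n" else "")) := by
      rw [renderBlock_cons_catN, renderBlock_nil, catN_nil, String.append_empty]
    simp only [List.reverse_nil, List.nil_append, goA, List.foldl_cons, List.foldl_nil]
    rw [hrender, hcand]
    simp [fillAStep, helC, hQ, hV, String.append_assoc]
    split_ifs <;> simp_all [lit_shift, String.append_assoc] <;> tauto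
  | cons p pre ih =>
    intro hpre hel e n t
    have hp : PySem.Str.isIn "enddef;" p = false := by
      have := hpre p (List.mem_cons_self ..); simpa [hE] using this
    have hpC : PySem.Chars.isIn ['e','n','d','d','e','f',';'] p.toList = false := by
      simpa using hp
    have hpre' : ∀ l ∈ pre, hE l = false := fun l hl => hpre l (List.mem_cons_of_mem _ hl)
    have hfold : goA (eline :: (p :: pre).reverse) (e, n, t)
        = fillAStep (goA (eline :: pre.reverse) (e, n, t)) p := by
      rw [List.reverse_cons, show eline :: (pre.reverse ++ [p]) = (eline :: pre.reverse) ++ [p] from rfl]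
      simp [goA, List.foldl_append]
    rw [hfold, ih hpre' hel e n t,
        show (p :: pre) ++ [eline] = p :: (pre ++ [eline]) from rfl,
        renderBlock_cons_catN, candN_cons]
    cases hc : candN (pre ++ [eline]) with
    | some c =>
      simp [fillAStep, hpC, hQ, hV, String.append_assoc, List.any_cons]
    | none =>
      simp [fillAStep, hpC, hQ, hV, String.append_assoc, List.any_cons]
      split_ifs <;> simp_all [lit_shift, String.append_assoc] <;> tauto

-- ---- B-side loop structure ----

theorem goB_factor (ls : List String) : ∀ (ps bs : List String),
    goB ls (ps, bs) = (ps ++ (goB ls ([], bs)).1, (goB ls ([], bs)).2) := by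
  induction ls with
  | nil => intro ps bs; simp [goB]
  | cons l ls ih =>
    intro ps bs
    by_cases h : PySem.Str.isIn "enddef;" l
    · have hC : PySem.Chars.isIn ['e','n','d','d','e','f',';'] l.toList = true := by simpa using h
      have hstep : ∀ qs : List String, fillBStep (qs, bs) l = (qs ++ renderBlock (bs ++ [l]), []) := by
        intro qs; simp [fillBStep, hC]
      rw [show goB (l :: ls) (ps, bs) = goB ls (fillBStep (ps, bs) l) from rfl,
          show goB (l :: ls) ([], bs) = goB ls (fillBStep ([], bs) l) from rfl,
          hstep ps, hstep [], List.nil_append,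
          ih (ps ++ renderBlock (bs ++ [l])) [], ih (renderBlock (bs ++ [l])) []]
      simp [List.append_assoc]
    · have hC : PySem.Chars.isIn ['e','n','d','d','e','f',';'] l.toList = false := by simpa using h
      have hstep : fillBStep (ps, bs) l = (ps, bs ++ [l]) := by simp [fillBStep, hC]
      have hstep0 : fillBStep ([], bs) l = ([], bs ++ [l]) := by simp [fillBStep, hC]
      rw [show goB (l :: ls) (ps, bs) = goB ls (fillBStep (ps, bs) l) from rfl,
          show goB (l :: ls) ([], bs) = goB ls (fillBStep ([], bs) l) from rfl,
          hstep, hstep0]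
      exact ih ps (bs ++ [l])

theorem goB_no_end (ls : List String) : (∀ l ∈ ls, hE l = false) → ∀ (ps bs : List String),
    goB ls (ps, bs) = (ps, bs ++ ls) := by
  induction ls with
  | nil => intro _ ps bs; simp [goB]
  | cons l ls ih =>
    intro h ps bs
    have hl : PySem.Str.isIn "enddef;" l = false := by
      have := h l (List.mem_cons_self ..); simpa [hE] using this
    have hC : PySem.Chars.isIn ['e','n','d','d','e','f',';'] l.toList = false := by simpa using hl
    have hstep : fillBStep (ps, bs) l = (ps, bs ++ [l]) := by simp [fillBStep, hC]
    rw [show goB (l :: ls) (ps, bs) = goB ls (fillBStep (ps, bs) l) from rfl, hstep,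
        ih (fun x hx => h x (List.mem_cons_of_mem _ hx)) ps (bs ++ [l])]
    simp

-- ---- main induction ----

theorem main_eq (lines : List String) :
    (goA lines.reverse (false, false, "")).2.2 =
      catN ((goB lines ([], [])).1 ++ (goB lines ([], [])).2.map (· ++ "\n")) := by
  suffices H : ∀ (n : Nat) (ls : List String), ls.length ≤ n →
      (goA ls.reverse (false, false, "")).2.2 =
        catN ((goB ls ([], [])).1 ++ (goB ls ([], [])).2.map (· ++ "\n")) by
    exact H lines.length lines le_rfl
  intro n
  induction n with
  | zero =>
    intro ls hls
    have : ls = [] := List.eq_nil_of_length_eq_zero (Nat.le_zero.mp hls)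
    subst this
    simp [goA, goB, catN]
  | succ n ihn =>
    intro ls hls
    cases hd : List.dropWhile (fun l => !hE l) ls with
    | nil =>
      have hall : ∀ l ∈ ls, hE l = false := by
        intro l hl
        have heq : List.takeWhile (fun l => !hE l) ls = ls := by
          have := List.takeWhile_append_dropWhile (p := fun l => !hE l) (l := ls)
          rw [hd] at this; simpa using this
        have := List.mem_takeWhile_imp (heq ▸ hl)
        simpa using this
      obtain ⟨-, hT⟩ := goA_no_end ls hall false ""
      rw [hT, goB_no_end ls hall [] []]
      simp [String.append_empty]
    | cons eline rest =>
      have hsplit : ls = List.takeWhile (fun l => !hE l) ls ++ eline :: rest := by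
        conv_lhs => rw [← List.takeWhile_append_dropWhile (p := fun l => !hE l) (l := ls)]
        rw [hd]
      have hne : List.dropWhile (fun l => !hE l) ls ≠ [] := by rw [hd]; simp
      have hel : hE eline = true := by
        have h3 := List.head_dropWhile_not (fun l => !hE l) hne
        have h5 : (List.dropWhile (fun l => !hE l) ls).head? = some eline := by rw [hd]; rfl
        have h6 := List.head?_eq_head hne
        rw [h6] at h5
        injection h5 with h7
        rw [h7] at h3
        simpa using h3
      have hpre : ∀ l ∈ List.takeWhile (fun l => !hE l) ls, hE l = false := by
        intro l hl
        have := List.mem_takeWhile_imp hl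
        simpa using this
      have hrest : rest.length ≤ n := by
        have hlen : ls.length = (List.takeWhile (fun l => !hE l) ls).length + rest.length + 1 := by
          conv_lhs => rw [hsplit]
          simp [List.length_append]
          omega
        omega
      set pre := List.takeWhile (fun l => !hE l) ls with hpre_def
      -- A side
      have hA : goA ls.reverse (false, false, "")
          = goA (eline :: pre.reverse) (goA rest.reverse (false, false, "")) := by
        conv_lhs => rw [hsplit]
        simp [goA, List.reverse_append, List.reverse_cons, List.foldl_append]
      rcases h1 : goA rest.reverse (false, false, "") with ⟨e1, n1, t1⟩
      rw [hA, h1, goA_block pre eline hpre hel e1 n1 t1]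
      -- B side
      have helC : PySem.Chars.isIn ['e','n','d','d','e','f',';'] eline.toList = true := by
        simpa using (hel : PySem.Str.isIn "enddef;" eline = true)
      have hB : goB ls ([], []) = goB rest (renderBlock (pre ++ [eline]), []) := by
        conv_lhs => rw [hsplit]
        rw [show goB (pre ++ eline :: rest) ([], []) = goB rest (fillBStep (goB pre ([], [])) eline) from by
              simp [goB, List.foldl_append],
            goB_no_end pre hpre [] []]
        have hstep : fillBStep ([], [] ++ pre) eline = (renderBlock (pre ++ [eline]), []) := by
          simp [fillBStep, helC]
        rw [hstep]
      rcases h2 : goB rest ([], []) with ⟨P1, T1⟩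
      have hB2 : goB rest (renderBlock (pre ++ [eline]), []) =
          (renderBlock (pre ++ [eline]) ++ P1, T1) := by
        rw [goB_factor rest (renderBlock (pre ++ [eline])) [], h2]
      rw [hB, hB2]
      simp only
      rw [List.append_assoc, catN_append]
      have hIH := ihn rest hrest
      rw [h1, h2] at hIH
      simp only at hIH
      rw [← hIH]

-- ===== VERDICT (by name: the statement is the Claim_ definition above) =====
theorem fillEquationString_spec : Claim_equal_fillEquationString := by
  intro txt _
  unfold Spec_fillEquationString fillEquationString fillEquationString_alt
  rw [show ((PySem.Str.split? txt "\n").getD []).reverse.foldl fillAStep (false, false, "")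
        = goA ((PySem.Str.split? txt "\n").getD []).reverse (false, false, "") from rfl]
  rw [main_eq, join_eq_catN]
  rfl
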